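-- pv_equiv track=rewrite | github.com/URAHASAM/compiladorers | rergregrgr.py | verificarNum
-- ===== SOURCE A (Python) =====
-- def verificarNum(cadena):
--     estado = 12
--     for c in cadena:
--         if estado == 12:
--             if c.isdigit():
--                 estado = 13
--             else:
--                 estado = -1
--                 break
--         elif estado == 13:
--             if c.isdigit():
--                 estado = 13
--             elif c == '.':
--                 estado = 14
--             elif c in ('E', 'e'):
--                 estado = 16
--             elif c == '#':
--                 estado = 20
--             else:
--                 estado = -1
--                 break
--         elif estado == 14:
--             if c.isdigit():
--                 estado = 15
--             else:
--                 estado = -1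
--                 break
--         elif estado == 15:
--             if c.isdigit():
--                 estado = 15
--             elif c in ('E', 'e'):
--                 estado = 16
--             elif c == '#':
--                 estado = 21
--             else:
--                 estado = -1
--                 break
--         elif estado == 16:
--             if c == '+' or c == '-':
--                 estado = 17
--             elif c.isdigit():
--                 estado = 18
--             else:
--                 estado = -1
--                 break
--         elif estado == 17:
--             if c.isdigit():
--                 estado = 18
--             else:
--                 estado = -1
--                 break
--         elif estado == 18:
--             if c.isdigit():
--                 estado = 18
--             elif c == '#':
--                 estado = 19
--             else:
--                 estado = -1
--                 break
--
--     if estado == 13 or estado == 15 or estado == 18 or estado == 19 or estado == 20 or estado == 21: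
--         return "Numero"
--     else:
--         return "es un elemento oprel"
-- ===== SOURCE B (Python) =====
-- def verificarNum(cadena):
--     h = cadena.find('#')
--     core = (cadena if h == -1 else cadena[:h]).lower()
--     j = core.find('e')
--     mant = core if j == -1 else core[:j]
--     k = mant.find('.')
--     if k == -1:
--         ok = mant.isdigit()
--     else:
--         ok = mant[:k].isdigit() and mant[k + 1:].isdigit()
--     if ok and j != -1:
--         expo = core[j + 1:]
--         if expo[:1] in ('+', '-'):
--             expo = expo[1:]
--         ok = expo.isdigit()
--     return "Numero" if ok else "es un elemento oprel"
-- ===== Notes on version B (the rewrite author's own statement) =====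
-- stated objective: simpler
-- what changed: Replaces the 8-state DFA character loop with direct string decomposition: cut at the first hash mark, lowercase, split at the exponent marker and the decimal point with find/slices, and validate each piece with str.isdigit.
import Mathlib
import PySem

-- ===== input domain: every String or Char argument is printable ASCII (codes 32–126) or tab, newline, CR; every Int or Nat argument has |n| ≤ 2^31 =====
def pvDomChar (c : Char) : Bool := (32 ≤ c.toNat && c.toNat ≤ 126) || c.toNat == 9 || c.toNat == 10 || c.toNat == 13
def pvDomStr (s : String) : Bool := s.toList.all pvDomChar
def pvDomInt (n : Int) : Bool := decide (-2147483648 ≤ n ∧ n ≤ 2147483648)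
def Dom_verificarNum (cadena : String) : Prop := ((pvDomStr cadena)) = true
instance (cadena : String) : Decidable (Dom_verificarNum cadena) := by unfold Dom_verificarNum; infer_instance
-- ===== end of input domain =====

-- B replaces A's 8-state DFA loop with direct string decomposition (cut at the
-- first hash mark, lowercase, split at the exponent marker and the decimal
-- point, isdigit checks on the pieces) — objective: simpler.

-- ===== PORT A =====
-- One step of A's loop. States 19/20/21 match no branch in the Python loop body,
-- and after `estado = -1; break` the remaining characters leave estado at -1, so
-- the final `else` keeping estado models both exactly.
def vnStep (estado : Int) (c : Char) : Int :=
  if estado = 12 then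
    if PySem.Chars.isdigit c then 13 else -1
  else if estado = 13 then
    if PySem.Chars.isdigit c then 13
    else if c = '.' then 14
    else if c = 'E' ∨ c = 'e' then 16
    else if c = '#' then 20
    else -1
  else if estado = 14 then
    if PySem.Chars.isdigit c then 15 else -1
  else if estado = 15 then
    if PySem.Chars.isdigit c then 15
    else if c = 'E' ∨ c = 'e' then 16
    else if c = '#' then 21
    else -1
  else if estado = 16 then
    if c = '+' ∨ c = '-' then 17
    else if PySem.Chars.isdigit c then 18
    else -1
  else if estado = 17 then
    if PySem.Chars.isdigit c then 18 else -1
  else if estado = 18 then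
    if PySem.Chars.isdigit c then 18
    else if c = '#' then 19
    else -1
  else estado

def verificarNum (cadena : String) : String :=
  let estado := cadena.toList.foldl vnStep 12
  if estado = 13 ∨ estado = 15 ∨ estado = 18 ∨ estado = 19 ∨ estado = 20 ∨ estado = 21
  then "Numero" else "es un elemento oprel"

-- ===== PORT B =====
def verificarNum_alt (cadena : String) : String :=
  let h := PySem.Str.find cadena "#"
  let core := PySem.Str.lower (if h = -1 then cadena else PySem.Str.slice cadena none (some h))
  let j := PySem.Str.find core "e"
  let mant := if j = -1 then core else PySem.Str.slice core none (some j)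
  let k := PySem.Str.find mant "."
  let ok := if k = -1 then PySem.Str.strIsdigit mant
    else PySem.Str.strIsdigit (PySem.Str.slice mant none (some k)) &&
         PySem.Str.strIsdigit (PySem.Str.slice mant (some (k + 1)) none)
  let ok2 := if ok = true ∧ j ≠ -1 then
      let expo := PySem.Str.slice core (some (j + 1)) none
      let e1 := PySem.Str.slice expo none (some 1)
      if e1 = "+" ∨ e1 = "-" then PySem.Str.strIsdigit (PySem.Str.slice expo (some 1) none)
      else PySem.Str.strIsdigit expo
    else ok
  if ok2 = true then "Numero" else "es un elemento oprel"

-- ===== PRECONDITION & SPEC =====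
def Spec_verificarNum (cadena : String) (out : String) : Prop := out = verificarNum_alt cadena
instance (cadena : String) (out : String) : Decidable (Spec_verificarNum cadena out) := by unfold Spec_verificarNum; infer_instance

-- ===== CLAIM (what is proved, stated in full; the proofs are below) =====
def Claim_equal_verificarNum : Prop := ∀ (cadena : String), Dom_verificarNum cadena → Spec_verificarNum cadena (verificarNum cadena)

-- ===== LEMMAS AND PROOFS =====
lemma charEq (a b : Char) : a = b ↔ a.toNat = b.toNat :=
  ⟨fun h => h ▸ rfl, fun h => Char.ext (UInt32.toNat_inj.mp h)⟩
lemma charLe (a b : Char) : a ≤ b ↔ a.toNat ≤ b.toNat := by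
  rw [Char.le_def, UInt32.le_iff_toNat_le]; rfl
lemma lowerChar_upper (c : Char) (h : PySem.Chars.isupper c = true) :
    (PySem.Chars.lowerChar c).toNat = c.toNat + 32 ∧ 65 ≤ c.toNat ∧ c.toNat ≤ 90 := by
  have hb : 65 ≤ c.toNat ∧ c.toNat ≤ 90 := by
    simp only [PySem.Chars.isupper, Bool.and_eq_true, decide_eq_true_eq, charLe] at h
    exact ⟨h.1, h.2⟩
  refine ⟨?_, hb.1, hb.2⟩
  rw [PySem.Chars.lowerChar, if_pos h]
  unfold Char.ofNat
  rw [dif_pos (Or.inl (by omega))]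
  rfl
lemma lowerChar_id (c : Char) (h : PySem.Chars.isupper c = false) :
    PySem.Chars.lowerChar c = c := by
  rw [PySem.Chars.lowerChar, h]; simp
lemma isdigit_iff (c : Char) : PySem.Chars.isdigit c = true ↔ (48 ≤ c.toNat ∧ c.toNat ≤ 57) := by
  simp only [PySem.Chars.isdigit, Bool.and_eq_true, decide_eq_true_eq, charLe]
  exact Iff.rfl
lemma dg_lower (c : Char) : PySem.Chars.isdigit (PySem.Chars.lowerChar c) = PySem.Chars.isdigit c := by
  by_cases h : PySem.Chars.isupper c
  · obtain ⟨h1, h2, h3⟩ := lowerChar_upper c h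
    have a1 : PySem.Chars.isdigit (PySem.Chars.lowerChar c) = false := by
      rw [← Bool.not_eq_true, isdigit_iff, h1]; omega
    have a2 : PySem.Chars.isdigit c = false := by
      rw [← Bool.not_eq_true, isdigit_iff]; omega
    rw [a1, a2]
  · rw [lowerChar_id c (by simpa using h)]
lemma lowerChar_eq_iff (c d : Char) (hd : d.toNat < 65 ∨ (97 ≤ d.toNat ∧ d.toNat ≤ 122) ∨ 122 < d.toNat) :
    (PySem.Chars.lowerChar c = d) ↔ (c = d ∨ (PySem.Chars.isupper c = true ∧ c.toNat + 32 = d.toNat)) := by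
  by_cases h : PySem.Chars.isupper c
  · obtain ⟨h1, h2, h3⟩ := lowerChar_upper c h
    rw [charEq, h1, charEq]
    constructor
    · intro he; exact Or.inr ⟨h, he⟩
    · rintro (he | ⟨-, he⟩)
      · omega
      · exact he
  · rw [lowerChar_id c (by simpa using h)]
    constructor
    · exact Or.inl
    · rintro (he | ⟨hu, -⟩)
      · exact he
      · rw [hu] at h; exact absurd rfl h
lemma lowerChar_eq_low (c d : Char) (hd : d.toNat < 65) : (PySem.Chars.lowerChar c = d) ↔ c = d := by
  rw [lowerChar_eq_iff c d (Or.inl hd)]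
  constructor
  · rintro (h | ⟨hu, h⟩)
    · exact h
    · obtain ⟨-, h2, -⟩ := lowerChar_upper c hu; omega
  · exact Or.inl
lemma f_dot (c : Char) : (PySem.Chars.lowerChar c = '.') ↔ (c = '.') :=
  lowerChar_eq_low c '.' (by decide)
lemma f_hash (c : Char) : (PySem.Chars.lowerChar c = '#') ↔ (c = '#') :=
  lowerChar_eq_low c '#' (by decide)
lemma f_sign (c : Char) : (PySem.Chars.lowerChar c = '+' ∨ PySem.Chars.lowerChar c = '-') ↔ (c = '+' ∨ c = '-') := by
  rw [lowerChar_eq_low c '+' (by decide), lowerChar_eq_low c '-' (by decide)]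
lemma f_neverE (c : Char) : PySem.Chars.lowerChar c ≠ 'E' := by
  intro hc
  by_cases h : PySem.Chars.isupper c
  · obtain ⟨h1, h2, -⟩ := lowerChar_upper c h
    rw [charEq, h1, show ('E').toNat = 69 from by decide] at hc
    omega
  · rw [lowerChar_id c (by simpa using h)] at hc
    rw [hc] at h
    exact h (by decide)
lemma f_lowe (c : Char) : (PySem.Chars.lowerChar c = 'e') ↔ (c = 'e' ∨ c = 'E') := by
  rw [lowerChar_eq_iff c 'e' (Or.inr (Or.inl (by decide)))]
  constructor
  · rintro (h | ⟨hu, h⟩)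
    · exact Or.inl h
    · right
      rw [charEq, show ('E').toNat = 69 from by decide]
      rw [show ('e').toNat = 101 from by decide] at h
      omega
  · rintro (h | h)
    · exact Or.inl h
    · right
      constructor
      · rw [h]; decide
      · rw [charEq, show ('e').toNat = 101 from by decide] at *
        rw [show ('E').toNat = 69 from by decide] at h
        omega
lemma f_e (c : Char) : (PySem.Chars.lowerChar c = 'E' ∨ PySem.Chars.lowerChar c = 'e') ↔ (c = 'E' ∨ c = 'e') := by
  constructor
  · rintro (h | h)
    · exact absurd h (f_neverE c)
    · exact ((f_lowe c).mp h).elim Or.inr Or.inl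
  · intro h
    exact Or.inr ((f_lowe c).mpr (h.elim Or.inr Or.inl))

-- step-shape lemmas for A's DFA
lemma vnStep_12 (c : Char) : vnStep 12 c = if PySem.Chars.isdigit c then 13 else -1 := by
  simp [vnStep]
lemma vnStep_13 (c : Char) : vnStep 13 c =
    (if PySem.Chars.isdigit c then 13 else if c = '.' then 14
     else if c = 'E' ∨ c = 'e' then 16 else if c = '#' then 20 else -1) := by
  simp [vnStep]
lemma vnStep_14 (c : Char) : vnStep 14 c = if PySem.Chars.isdigit c then 15 else -1 := by
  simp [vnStep]
lemma vnStep_15 (c : Char) : vnStep 15 c =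
    (if PySem.Chars.isdigit c then 15 else if c = 'E' ∨ c = 'e' then 16
     else if c = '#' then 21 else -1) := by
  simp [vnStep]
lemma vnStep_16 (c : Char) : vnStep 16 c =
    (if c = '+' ∨ c = '-' then 17 else if PySem.Chars.isdigit c then 18 else -1) := by
  simp [vnStep]
lemma vnStep_17 (c : Char) : vnStep 17 c = if PySem.Chars.isdigit c then 18 else -1 := by
  simp [vnStep]
lemma vnStep_18 (c : Char) : vnStep 18 c =
    (if PySem.Chars.isdigit c then 18 else if c = '#' then 19 else -1) := by
  simp [vnStep]
lemma vnStep_absorb (s : Int) (c : Char) (h : s = -1 ∨ s = 19 ∨ s = 20 ∨ s = 21) :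
    vnStep s c = s := by
  rcases h with rfl | rfl | rfl | rfl <;> simp [vnStep]

def vnRun (s : Int) (l : List Char) : Int := l.foldl vnStep s

lemma vnRun_cons (s : Int) (c : Char) (t : List Char) : vnRun s (c :: t) = vnRun (vnStep s c) t := rfl

lemma vnRun_absorb (s : Int) (l : List Char) (h : s = -1 ∨ s = 19 ∨ s = 20 ∨ s = 21) :
    vnRun s l = s := by
  induction l with
  | nil => rfl
  | cons c t ih => rw [vnRun_cons, vnStep_absorb s c h]; exact ih

lemma stepLower (s : Int) (c : Char) : vnStep s (PySem.Chars.lowerChar c) = vnStep s c := by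
  simp only [vnStep, dg_lower, f_dot, f_e, f_hash, f_sign]

lemma runLower (s : Int) (m : List Char) : vnRun s (PySem.Chars.lower m) = vnRun s m := by
  show (m.map PySem.Chars.lowerChar).foldl vnStep s = m.foldl vnStep s
  rw [List.foldl_map]
  simp only [stepLower]

-- Bool specs mirroring the suffix languages of A's states
def digsB (l : List Char) : Bool := PySem.Chars.strIsdigit l

lemma digsB_nil : digsB [] = false := rfl
lemma digsB_cons (c : Char) (t : List Char) :
    digsB (c :: t) = (PySem.Chars.isdigit c && t.all PySem.Chars.isdigit) := by
  simp [digsB, PySem.Chars.strIsdigit]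

def expTB : List Char → Bool
  | [] => false
  | c :: t => if c = '+' ∨ c = '-' then digsB t else digsB (c :: t)

def S15B (l : List Char) : Bool :=
  match l.dropWhile PySem.Chars.isdigit with
  | [] => true
  | c :: r => if c = 'e' ∨ c = 'E' then expTB r else false

def S14B : List Char → Bool
  | [] => false
  | c :: t => PySem.Chars.isdigit c && S15B t

def S13B (l : List Char) : Bool :=
  match l.dropWhile PySem.Chars.isdigit with
  | [] => true
  | c :: r => if c = '.' then S14B r else if c = 'e' ∨ c = 'E' then expTB r else false

def S12B : List Char → Bool
  | [] => false
  | c :: t => PySem.Chars.isdigit c && S13B t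

def acc3B (s : Int) : Bool := s == 13 || s == 15 || s == 18
def accAB (s : Int) : Bool := s == 13 || s == 15 || s == 18 || s == 19 || s == 20 || s == 21

lemma L18 (l : List Char) (h : '#' ∉ l) : acc3B (vnRun 18 l) = l.all PySem.Chars.isdigit := by
  induction l with
  | nil => rfl
  | cons c t ih =>
    have hc : c ≠ '#' := fun e => h (e ▸ List.mem_cons_self)
    have ht : '#' ∉ t := fun m => h (List.mem_cons_of_mem _ m)
    rw [vnRun_cons, vnStep_18, List.all_cons]
    by_cases hd : PySem.Chars.isdigit c
    · rw [if_pos hd, ih ht, hd, Bool.true_and]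
    · rw [if_neg hd, if_neg hc, vnRun_absorb _ _ (Or.inl rfl),
        Bool.eq_false_iff.mpr hd, Bool.false_and]
      rfl

lemma L17 (l : List Char) (h : '#' ∉ l) : acc3B (vnRun 17 l) = digsB l := by
  cases l with
  | nil => rfl
  | cons c t =>
    have ht : '#' ∉ t := fun m => h (List.mem_cons_of_mem _ m)
    rw [vnRun_cons, vnStep_17, digsB_cons]
    by_cases hd : PySem.Chars.isdigit c
    · rw [if_pos hd, L18 t ht, hd, Bool.true_and]
    · rw [if_neg hd, vnRun_absorb _ _ (Or.inl rfl), Bool.eq_false_iff.mpr hd, Bool.false_and]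
      rfl

lemma L16 (l : List Char) (h : '#' ∉ l) : acc3B (vnRun 16 l) = expTB l := by
  cases l with
  | nil => rfl
  | cons c t =>
    have ht : '#' ∉ t := fun m => h (List.mem_cons_of_mem _ m)
    rw [vnRun_cons, vnStep_16]
    show _ = if c = '+' ∨ c = '-' then digsB t else digsB (c :: t)
    by_cases hs : c = '+' ∨ c = '-'
    · rw [if_pos hs, if_pos hs, L17 t ht]
    · rw [if_neg hs, if_neg hs, digsB_cons]
      by_cases hd : PySem.Chars.isdigit c
      · rw [if_pos hd, L18 t ht, hd, Bool.true_and]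
      · rw [if_neg hd, vnRun_absorb _ _ (Or.inl rfl), Bool.eq_false_iff.mpr hd, Bool.false_and]
        rfl

lemma L15 (l : List Char) (h : '#' ∉ l) : acc3B (vnRun 15 l) = S15B l := by
  induction l with
  | nil => rfl
  | cons c t ih =>
    have hc : c ≠ '#' := fun e => h (e ▸ List.mem_cons_self)
    have ht : '#' ∉ t := fun m => h (List.mem_cons_of_mem _ m)
    rw [vnRun_cons, vnStep_15]
    by_cases hd : PySem.Chars.isdigit c
    · rw [if_pos hd, ih ht]
      simp [S15B, hd]
    · rw [if_neg hd]
      have hS : S15B (c :: t) = if c = 'e' ∨ c = 'E' then expTB t else false := by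
        simp [S15B, hd]
      rw [hS]
      by_cases he : c = 'E' ∨ c = 'e'
      · rw [if_pos he, if_pos (he.elim Or.inr Or.inl), L16 t ht]
      · rw [if_neg he, if_neg hc, vnRun_absorb _ _ (Or.inl rfl),
          if_neg (fun x : c = 'e' ∨ c = 'E' => he (x.elim Or.inr Or.inl))]
        rfl

lemma L14 (l : List Char) (h : '#' ∉ l) : acc3B (vnRun 14 l) = S14B l := by
  cases l with
  | nil => rfl
  | cons c t =>
    have ht : '#' ∉ t := fun m => h (List.mem_cons_of_mem _ m)
    rw [vnRun_cons, vnStep_14]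
    show _ = (PySem.Chars.isdigit c && S15B t)
    by_cases hd : PySem.Chars.isdigit c
    · rw [if_pos hd, L15 t ht, hd, Bool.true_and]
    · rw [if_neg hd, vnRun_absorb _ _ (Or.inl rfl), Bool.eq_false_iff.mpr hd, Bool.false_and]
      rfl

lemma L13 (l : List Char) (h : '#' ∉ l) : acc3B (vnRun 13 l) = S13B l := by
  induction l with
  | nil => rfl
  | cons c t ih =>
    have hc : c ≠ '#' := fun e => h (e ▸ List.mem_cons_self)
    have ht : '#' ∉ t := fun m => h (List.mem_cons_of_mem _ m)
    rw [vnRun_cons, vnStep_13]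
    by_cases hd : PySem.Chars.isdigit c
    · rw [if_pos hd, ih ht]
      simp [S13B, hd]
    · rw [if_neg hd]
      have hS : S13B (c :: t) =
          if c = '.' then S14B t else if c = 'e' ∨ c = 'E' then expTB t else false := by
        simp [S13B, hd]
      rw [hS]
      by_cases hdot : c = '.'
      · rw [if_pos hdot, if_pos hdot, L14 t ht]
      · rw [if_neg hdot, if_neg hdot]
        by_cases he : c = 'E' ∨ c = 'e'
        · rw [if_pos he, if_pos (he.elim Or.inr Or.inl), L16 t ht]
        · rw [if_neg he, if_neg hc, vnRun_absorb _ _ (Or.inl rfl),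
            if_neg (fun x : c = 'e' ∨ c = 'E' => he (x.elim Or.inr Or.inl))]
          rfl

lemma L12 (l : List Char) (h : '#' ∉ l) : acc3B (vnRun 12 l) = S12B l := by
  cases l with
  | nil => rfl
  | cons c t =>
    have ht : '#' ∉ t := fun m => h (List.mem_cons_of_mem _ m)
    rw [vnRun_cons, vnStep_12]
    show _ = (PySem.Chars.isdigit c && S13B t)
    by_cases hd : PySem.Chars.isdigit c
    · rw [if_pos hd, L13 t ht, hd, Bool.true_and]
    · rw [if_neg hd, vnRun_absorb _ _ (Or.inl rfl), Bool.eq_false_iff.mpr hd, Bool.false_and]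
      rfl

-- states reachable before any '#'
def vnMid (s : Int) : Prop :=
  s = 12 ∨ s = 13 ∨ s = 14 ∨ s = 15 ∨ s = 16 ∨ s = 17 ∨ s = 18 ∨ s = -1

lemma vnStep_mid (s : Int) (c : Char) (hs : vnMid s) (hc : c ≠ '#') : vnMid (vnStep s c) := by
  rcases hs with rfl | rfl | rfl | rfl | rfl | rfl | rfl | rfl
  · rw [vnStep_12]; split_ifs <;> simp [vnMid]
  · rw [vnStep_13]; split_ifs <;> first | exact absurd ‹c = '#'› hc | simp [vnMid]
  · rw [vnStep_14]; split_ifs <;> simp [vnMid]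
  · rw [vnStep_15]; split_ifs <;> first | exact absurd ‹c = '#'› hc | simp [vnMid]
  · rw [vnStep_16]; split_ifs <;> simp [vnMid]
  · rw [vnStep_17]; split_ifs <;> simp [vnMid]
  · rw [vnStep_18]; split_ifs <;> first | exact absurd ‹c = '#'› hc | simp [vnMid]
  · rw [vnStep_absorb _ _ (Or.inl rfl)]; simp [vnMid]

lemma vnRun_mid (l : List Char) : ∀ (s : Int), '#' ∉ l → vnMid s → vnMid (vnRun s l) := by
  induction l with
  | nil => exact fun _ _ hs => hs
  | cons c t ih =>
    intro s h hs
    have hc : c ≠ '#' := fun e => h (e ▸ List.mem_cons_self)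
    have ht : '#' ∉ t := fun m => h (List.mem_cons_of_mem _ m)
    rw [vnRun_cons]
    exact ih _ ht (vnStep_mid s c hs hc)

lemma HA1 (l : List Char) (h : '#' ∉ l) : accAB (vnRun 12 l) = acc3B (vnRun 12 l) := by
  have := vnRun_mid l 12 h (Or.inl rfl)
  rcases this with e | e | e | e | e | e | e | e <;> rw [e] <;> rfl

lemma HA2 (m r : List Char) (h : '#' ∉ m) :
    accAB (vnRun 12 (m ++ '#' :: r)) = acc3B (vnRun 12 m) := by
  have hr : vnRun 12 (m ++ '#' :: r) = vnRun (vnStep (vnRun 12 m) '#') r := by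
    show (m ++ '#' :: r).foldl vnStep 12 = _
    rw [List.foldl_append]
    rfl
  rw [hr]
  have := vnRun_mid m 12 h (Or.inl rfl)
  rcases this with e | e | e | e | e | e | e | e <;> rw [e]
  · rw [show vnStep 12 '#' = -1 from by decide, vnRun_absorb _ _ (Or.inl rfl)]; rfl
  · rw [show vnStep 13 '#' = 20 from by decide, vnRun_absorb _ _ (by simp)]; rfl
  · rw [show vnStep 14 '#' = -1 from by decide, vnRun_absorb _ _ (Or.inl rfl)]; rfl
  · rw [show vnStep 15 '#' = 21 from by decide, vnRun_absorb _ _ (by simp)]; rfl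
  · rw [show vnStep 16 '#' = -1 from by decide, vnRun_absorb _ _ (Or.inl rfl)]; rfl
  · rw [show vnStep 17 '#' = -1 from by decide, vnRun_absorb _ _ (Or.inl rfl)]; rfl
  · rw [show vnStep 18 '#' = 19 from by decide, vnRun_absorb _ _ (by simp)]; rfl
  · rw [vnStep_absorb _ _ (Or.inl rfl), vnRun_absorb _ _ (Or.inl rfl)]; rfl

-- find: first-occurrence characterisation
lemma find_eq_first (l sub : List Char) (k : Nat) (hk : sub <+: l.drop k)
    (hmin : ∀ i < k, ¬ sub <+: l.drop i) : PySem.Chars.find l sub = k := by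
  have hinf : sub <:+: l := hk.isInfix.trans (List.drop_suffix k l).isInfix
  have hne : PySem.Chars.find l sub ≠ -1 := (PySem.Chars.find_ne_neg_one_iff l sub).mpr hinf
  have h0 : 0 ≤ PySem.Chars.find l sub := by
    have := PySem.Chars.neg_one_le_find l sub
    omega
  obtain ⟨hpre, hm⟩ := PySem.Chars.find_spec h0
  have h1 : ¬ (PySem.Chars.find l sub).toNat < k := fun hlt => hmin _ hlt hpre
  have h2 : ¬ k < (PySem.Chars.find l sub).toNat := fun hlt => hm k hlt hk
  have : (PySem.Chars.find l sub).toNat = k := by omega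
  omega

lemma singleton_prefix_iff (c : Char) (r : List Char) : [c] <+: r ↔ r.head? = some c := by
  constructor
  · rintro ⟨t, rfl⟩; rfl
  · intro h
    cases r with
    | nil => simp at h
    | cons a t =>
      simp only [List.head?_cons, Option.some.injEq] at h
      subst h
      exact ⟨t, rfl⟩

lemma find1_neg (l : List Char) (c : Char) : PySem.Chars.find l [c] = -1 ↔ c ∉ l := by
  rw [PySem.Chars.find_eq_neg_one_iff]
  constructor
  · intro h hm
    obtain ⟨s, t, rfl⟩ := List.append_of_mem hm
    exact h ⟨s, t, by simp⟩
  · intro h hinf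
    exact h (List.singleton_sublist.mp hinf.sublist)

lemma splitAtChar (l : List Char) (c : Char) (h : c ∈ l) :
    PySem.Chars.find l [c] = ((l.takeWhile (fun x => x != c)).length : Int) ∧
    l = l.takeWhile (fun x => x != c) ++ c :: (l.dropWhile (fun x => x != c)).tail ∧
    ∀ x ∈ l.takeWhile (fun x => x != c), x ≠ c := by
  set p : Char → Bool := fun x => x != c with hp
  have hdne : l.dropWhile p ≠ [] := by
    rw [Ne, List.dropWhile_eq_nil_iff]
    intro hall
    have := hall c h
    simp [hp] at this
  have hhead : (l.dropWhile p).head? = some c := by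
    rw [List.head?_eq_some_head hdne]
    have hb := List.head_dropWhile_not p hdne
    simp only [hp, bne_eq_false_iff_eq] at hb
    exact congrArg some hb
  have hdec : c :: (l.dropWhile p).tail = l.dropWhile p := List.cons_head?_tail hhead
  have htw : ∀ x ∈ l.takeWhile p, x ≠ c := by
    intro x hx
    have := List.mem_takeWhile_imp hx
    simpa [hp] using this
  set tw := l.takeWhile p with htwdef
  have hsplit : l = tw ++ c :: (l.dropWhile p).tail := by
    conv_rhs => rw [hdec]
    rw [htwdef, List.takeWhile_append_dropWhile]
  refine ⟨?_, hsplit, htw⟩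
  apply find_eq_first
  · rw [singleton_prefix_iff]
    conv_lhs => rw [hsplit]
    rw [List.drop_left, List.head?_cons]
  · intro i hi hpre
    rw [singleton_prefix_iff, List.head?_drop] at hpre
    have hlen : tw.length ≤ l.length := (List.takeWhile_prefix p).length_le
    have hil : i < l.length := by omega
    rw [List.getElem?_eq_getElem hil] at hpre
    have hic : l[i] = c := Option.some.inj hpre
    have hit : l[i] = tw[i]'hi := ((List.takeWhile_prefix p).getElem hi).symm
    exact htw _ (List.getElem_mem _) (by rw [← hit, hic])

-- B's mantissa check, list level, and its structured twin
def MB (m : List Char) : Bool :=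
  if '.' ∈ m then
    digsB (m.takeWhile (fun x => x != '.')) && digsB ((m.dropWhile (fun x => x != '.')).tail)
  else digsB m

def MtB (t : List Char) : Bool :=
  if '.' ∈ t then
    (t.takeWhile (fun x => x != '.')).all PySem.Chars.isdigit &&
      digsB ((t.dropWhile (fun x => x != '.')).tail)
  else t.all PySem.Chars.isdigit

lemma dg_dot : PySem.Chars.isdigit '.' = false := by decide
lemma dg_e : PySem.Chars.isdigit 'e' = false := by decide

lemma mtb_digit (c : Char) (t : List Char) (hd : PySem.Chars.isdigit c = true) :
    MtB (c :: t) = MtB t := by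
  have hc : c ≠ '.' := fun e => by rw [e] at hd; exact absurd hd (by decide)
  have hbne : (c != '.') = true := bne_iff_ne.mpr hc
  by_cases hm : '.' ∈ t
  · simp [MtB, List.mem_cons, Ne.symm hc, hm, hbne, hd]
  · simp [MtB, List.mem_cons, Ne.symm hc, hm, hd]

lemma mtb_dot (t : List Char) : MtB ('.' :: t) = digsB t := by
  simp [MtB, List.mem_cons]

lemma mtb_other (c : Char) (t : List Char) (hd : PySem.Chars.isdigit c = false)
    (hc : c ≠ '.') : MtB (c :: t) = false := by
  have hbne : (c != '.') = true := bne_iff_ne.mpr hc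
  by_cases hm : '.' ∈ t
  · simp [MtB, List.mem_cons, Ne.symm hc, hm, hbne, hd]
  · simp [MtB, List.mem_cons, Ne.symm hc, hm, hd]

lemma MB_cons (c : Char) (t : List Char) :
    MB (c :: t) = (PySem.Chars.isdigit c && MtB t) := by
  by_cases hc : c = '.'
  · subst hc
    simp [MB, List.mem_cons, digsB_nil, dg_dot]
  · have hbne : (c != '.') = true := bne_iff_ne.mpr hc
    by_cases hm : '.' ∈ t
    · simp [MB, MtB, List.mem_cons, Ne.symm hc, hm, hbne, digsB_cons, Bool.and_assoc]
    · simp [MB, MtB, List.mem_cons, Ne.symm hc, hm, digsB_cons]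

lemma s15a (t : List Char) (he : 'e' ∉ t) (hE : 'E' ∉ t) :
    S15B t = t.all PySem.Chars.isdigit := by
  induction t with
  | nil => rfl
  | cons c t ih =>
    have hce : c ≠ 'e' := fun e => he (e ▸ List.mem_cons_self)
    have hcE : c ≠ 'E' := fun e => hE (e ▸ List.mem_cons_self)
    have hte : 'e' ∉ t := fun m => he (List.mem_cons_of_mem _ m)
    have htE : 'E' ∉ t := fun m => hE (List.mem_cons_of_mem _ m)
    by_cases hd : PySem.Chars.isdigit c
    · rw [show S15B (c :: t) = S15B t from by simp [S15B, hd], ih hte htE,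
        List.all_cons, hd, Bool.true_and]
    · rw [show S15B (c :: t) = false from by simp [S15B, hd, hce, hcE],
        List.all_cons, Bool.eq_false_iff.mpr hd, Bool.false_and]

lemma s15b (t q : List Char) (he : 'e' ∉ t) (hE : 'E' ∉ t) :
    S15B (t ++ 'e' :: q) = (t.all PySem.Chars.isdigit && expTB q) := by
  induction t with
  | nil =>
    simp only [List.nil_append, List.all_nil, Bool.true_and]
    simp [S15B, dg_e]
  | cons c t ih =>
    have hce : c ≠ 'e' := fun e => he (e ▸ List.mem_cons_self)
    have hcE : c ≠ 'E' := fun e => hE (e ▸ List.mem_cons_self)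
    have hte : 'e' ∉ t := fun m => he (List.mem_cons_of_mem _ m)
    have htE : 'E' ∉ t := fun m => hE (List.mem_cons_of_mem _ m)
    rw [List.cons_append]
    by_cases hd : PySem.Chars.isdigit c
    · rw [show S15B (c :: (t ++ 'e' :: q)) = S15B (t ++ 'e' :: q) from by simp [S15B, hd],
        ih hte htE, List.all_cons, hd, Bool.true_and]
    · rw [show S15B (c :: (t ++ 'e' :: q)) = false from by simp [S15B, hd, hce, hcE],
        List.all_cons, Bool.eq_false_iff.mpr hd, Bool.false_and, Bool.false_and]

lemma s14a (t : List Char) (he : 'e' ∉ t) (hE : 'E' ∉ t) : S14B t = digsB t := by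
  cases t with
  | nil => rfl
  | cons c t =>
    show (PySem.Chars.isdigit c && S15B t) = _
    rw [s15a t (fun m => he (List.mem_cons_of_mem _ m)) (fun m => hE (List.mem_cons_of_mem _ m)),
      digsB_cons]

lemma s14b (t q : List Char) (he : 'e' ∉ t) (hE : 'E' ∉ t) :
    S14B (t ++ 'e' :: q) = (digsB t && expTB q) := by
  cases t with
  | nil =>
    show (PySem.Chars.isdigit 'e' && S15B q) = _
    rw [dg_e, digsB_nil, Bool.false_and, Bool.false_and]
  | cons c t =>
    rw [List.cons_append]
    show (PySem.Chars.isdigit c && S15B (t ++ 'e' :: q)) = _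
    rw [s15b t q (fun m => he (List.mem_cons_of_mem _ m)) (fun m => hE (List.mem_cons_of_mem _ m)),
      digsB_cons, Bool.and_assoc]

lemma s13a (t : List Char) (he : 'e' ∉ t) (hE : 'E' ∉ t) : S13B t = MtB t := by
  induction t with
  | nil => rfl
  | cons c t ih =>
    have hce : c ≠ 'e' := fun e => he (e ▸ List.mem_cons_self)
    have hcE : c ≠ 'E' := fun e => hE (e ▸ List.mem_cons_self)
    have hte : 'e' ∉ t := fun m => he (List.mem_cons_of_mem _ m)
    have htE : 'E' ∉ t := fun m => hE (List.mem_cons_of_mem _ m)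
    by_cases hd : PySem.Chars.isdigit c
    · rw [show S13B (c :: t) = S13B t from by simp [S13B, hd], ih hte htE, mtb_digit c t hd]
    · by_cases hdot : c = '.'
      · subst hdot
        rw [show S13B ('.' :: t) = S14B t from by simp [S13B, hd], mtb_dot,
          s14a t hte htE]
      · rw [show S13B (c :: t) = false from by simp [S13B, hd, hdot, hce, hcE],
          mtb_other c t (Bool.eq_false_iff.mpr hd) hdot]

lemma s13b (t q : List Char) (he : 'e' ∉ t) (hE : 'E' ∉ t) :
    S13B (t ++ 'e' :: q) = (MtB t && expTB q) := by
  induction t with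
  | nil =>
    rw [List.nil_append, show MtB [] = true from rfl, Bool.true_and]
    simp [S13B, dg_e]
  | cons c t ih =>
    have hce : c ≠ 'e' := fun e => he (e ▸ List.mem_cons_self)
    have hcE : c ≠ 'E' := fun e => hE (e ▸ List.mem_cons_self)
    have hte : 'e' ∉ t := fun m => he (List.mem_cons_of_mem _ m)
    have htE : 'E' ∉ t := fun m => hE (List.mem_cons_of_mem _ m)
    rw [List.cons_append]
    by_cases hd : PySem.Chars.isdigit c
    · rw [show S13B (c :: (t ++ 'e' :: q)) = S13B (t ++ 'e' :: q) from by simp [S13B, hd],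
        ih hte htE, mtb_digit c t hd]
    · by_cases hdot : c = '.'
      · subst hdot
        rw [show S13B ('.' :: (t ++ 'e' :: q)) = S14B (t ++ 'e' :: q) from by simp [S13B, hd],
          mtb_dot, s14b t q hte htE]
      · rw [show S13B (c :: (t ++ 'e' :: q)) = false from by simp [S13B, hd, hdot, hce, hcE],
          mtb_other c t (Bool.eq_false_iff.mpr hd) hdot, Bool.false_and]

lemma G4a (m : List Char) (he : 'e' ∉ m) (hE : 'E' ∉ m) : S12B m = MB m := by
  cases m with
  | nil => rfl
  | cons c t =>
    show (PySem.Chars.isdigit c && S13B t) = _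
    rw [s13a t (fun x => he (List.mem_cons_of_mem _ x)) (fun x => hE (List.mem_cons_of_mem _ x)),
      MB_cons]

lemma G4b (m q : List Char) (he : 'e' ∉ m) (hE : 'E' ∉ m) :
    S12B (m ++ 'e' :: q) = (MB m && expTB q) := by
  cases m with
  | nil =>
    show (PySem.Chars.isdigit 'e' && S13B q) = _
    rw [dg_e, Bool.false_and, show MB [] = false from rfl, Bool.false_and]
  | cons c t =>
    rw [List.cons_append]
    show (PySem.Chars.isdigit c && S13B (t ++ 'e' :: q)) = _
    rw [s13b t q (fun x => he (List.mem_cons_of_mem _ x)) (fun x => hE (List.mem_cons_of_mem _ x)),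
      MB_cons, Bool.and_assoc]

-- B's whole check at list level
def BLok (mant : List Char) : Bool :=
  if PySem.Chars.find mant ['.'] = -1 then digsB mant
  else digsB (mant.take (PySem.Chars.find mant ['.']).toNat) &&
       digsB (mant.drop ((PySem.Chars.find mant ['.']) + 1).toNat)

def BLexp (expo : List Char) : Bool :=
  if expo.take 1 = ['+'] ∨ expo.take 1 = ['-'] then digsB (expo.drop 1) else digsB expo

def BL (L : List Char) : Bool :=
  if PySem.Chars.find L ['e'] = -1 then BLok L
  else if BLok (L.take (PySem.Chars.find L ['e']).toNat) then
    BLexp (L.drop ((PySem.Chars.find L ['e']) + 1).toNat)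
  else false

lemma BLexp_eq (r : List Char) : BLexp r = expTB r := by
  cases r with
  | nil => simp [BLexp, expTB, digsB_nil]
  | cons c t =>
    show (if [c] = ['+'] ∨ [c] = ['-'] then digsB t else digsB (c :: t)) = _
    simp only [List.cons.injEq, and_true, expTB]

lemma take_split (tw rest : List Char) (c : Char) :
    (tw ++ c :: rest).take tw.length = tw ∧ (tw ++ c :: rest).drop (tw.length + 1) = rest := by
  constructor
  · rw [List.take_left]
  · rw [show tw ++ c :: rest = (tw ++ [c]) ++ rest from by simp,
      List.drop_left' (by simp)]

lemma MBval (m : List Char) : BLok m = MB m := by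
  by_cases hm : '.' ∈ m
  · obtain ⟨hf, hsplit, -⟩ := splitAtChar m '.' hm
    set tw := m.takeWhile (fun x => x != '.') with htw0
    set rest := (m.dropWhile (fun x => x != '.')).tail with hrest0
    have hne : PySem.Chars.find m ['.'] ≠ -1 := by rw [hf]; omega
    rw [BLok, if_neg hne, hf,
      show (((tw.length : Int)) + 1) = ((tw.length + 1 : Nat) : Int) from by push_cast; ring,
      Int.toNat_natCast, Int.toNat_natCast]
    have h1 := take_split tw rest '.'
    rw [MB, if_pos hm, ← htw0, ← hrest0]
    conv_lhs => rw [hsplit]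
    rw [h1.1, h1.2]
  · rw [BLok, if_pos ((find1_neg m '.').mpr hm), MB, if_neg hm]

lemma BLval (L : List Char) (hE : 'E' ∉ L) : BL L = S12B L := by
  by_cases he : 'e' ∈ L
  · obtain ⟨hf, hsplit, htw⟩ := splitAtChar L 'e' he
    set tw := L.takeWhile (fun x => x != 'e') with htw0
    set rest := (L.dropWhile (fun x => x != 'e')).tail with hrest0
    have hne : PySem.Chars.find L ['e'] ≠ -1 := by rw [hf]; omega
    have htwe : 'e' ∉ tw := fun hx => htw _ hx rfl
    have htwE : 'E' ∉ tw :=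
      fun hx => hE ((List.takeWhile_prefix _).sublist.subset hx)
    have h1 := take_split tw rest 'e'
    have hmant : L.take (PySem.Chars.find L ['e']).toNat = tw := by
      rw [hf, Int.toNat_natCast]
      conv_lhs => rw [hsplit]
      exact h1.1
    have hexpo : L.drop ((PySem.Chars.find L ['e']) + 1).toNat = rest := by
      rw [hf, show (((tw.length : Int)) + 1) = ((tw.length + 1 : Nat) : Int) from by
          push_cast; ring, Int.toNat_natCast]
      conv_lhs => rw [hsplit]
      exact h1.2
    rw [BL, if_neg hne, hmant, hexpo, MBval, BLexp_eq]
    conv_rhs => rw [hsplit]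
    rw [G4b _ _ htwe htwE]
    by_cases hMB : MB tw = true
    · rw [if_pos hMB, hMB, Bool.true_and]
    · rw [if_neg hMB, Bool.eq_false_iff.mpr hMB, Bool.false_and]
  · rw [BL, if_pos ((find1_neg L 'e').mpr he), MBval, G4a L he hE]

def coreOf (l : List Char) : List Char :=
  if PySem.Chars.find l ['#'] = -1 then l else l.take (PySem.Chars.find l ['#']).toNat

lemma accAB_iff (s : Int) :
    accAB s = true ↔ (s = 13 ∨ s = 15 ∨ s = 18 ∨ s = 19 ∨ s = 20 ∨ s = 21) := by
  simp [accAB, or_assoc]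

lemma Abridge (cadena : String) : verificarNum cadena =
    (if accAB (vnRun 12 cadena.toList) = true then "Numero" else "es un elemento oprel") := by
  show (if vnRun 12 cadena.toList = 13 ∨ vnRun 12 cadena.toList = 15 ∨
      vnRun 12 cadena.toList = 18 ∨ vnRun 12 cadena.toList = 19 ∨
      vnRun 12 cadena.toList = 20 ∨ vnRun 12 cadena.toList = 21
    then "Numero" else "es un elemento oprel") = _
  by_cases h : accAB (vnRun 12 cadena.toList) = true
  · rw [if_pos ((accAB_iff _).mp h), if_pos h]
  · rw [if_neg (fun x => h ((accAB_iff _).mpr x)), if_neg h]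

lemma strEq (s t : String) : (s = t) ↔ s.toList = t.toList := String.ext_iff

lemma not_hash_lower (m : List Char) (h : '#' ∉ m) : '#' ∉ PySem.Chars.lower m := by
  intro hx
  obtain ⟨c, hc, he⟩ := List.mem_map.mp hx
  exact h (((f_hash c).mp he) ▸ hc)

lemma not_E_lower (m : List Char) : 'E' ∉ PySem.Chars.lower m := by
  intro hx
  obtain ⟨c, hc, he⟩ := List.mem_map.mp hx
  exact f_neverE c he

theorem listMain (l : List Char) : accAB (vnRun 12 l) = BL (PySem.Chars.lower (coreOf l)) := by
  by_cases hh : '#' ∈ l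
  · obtain ⟨hf, hsplit, htw⟩ := splitAtChar l '#' hh
    set tw := l.takeWhile (fun x => x != '#') with htw0
    set rest := (l.dropWhile (fun x => x != '#')).tail with hrest0
    have htwh : '#' ∉ tw := fun hx => htw _ hx rfl
    have hcore : coreOf l = tw := by
      rw [coreOf, if_neg (by rw [hf]; omega), hf, Int.toNat_natCast]
      conv_lhs => rw [hsplit]
      exact (take_split tw rest '#').1
    rw [hcore]
    conv_lhs => rw [hsplit]
    rw [HA2 tw rest htwh, ← runLower 12 tw, L12 _ (not_hash_lower tw htwh),
      BLval _ (not_E_lower tw)]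
  · have hcore : coreOf l = l := by rw [coreOf, if_pos ((find1_neg l '#').mpr hh)]
    rw [hcore, HA1 l hh, ← runLower 12 l, L12 _ (not_hash_lower l hh),
      BLval _ (not_E_lower l)]
lemma Bbridge (cadena : String) :
    verificarNum_alt cadena =
      (if BL (PySem.Chars.lower (coreOf cadena.toList)) = true then "Numero"
       else "es un elemento oprel") := by
  simp only [verificarNum_alt]
  set cs := PySem.Str.lower (if PySem.Str.find cadena "#" = -1 then cadena
    else PySem.Str.slice cadena none (some (PySem.Str.find cadena "#"))) with hcs
  have h1 : PySem.Str.find cadena "#" = PySem.Chars.find cadena.toList ['#'] := by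
    rw [PySem.Str.find_eq, show ("#" : String).toList = ['#'] from by decide]
  have hcore : cs.toList = PySem.Chars.lower (coreOf cadena.toList) := by
    rw [hcs, PySem.Str.toList_lower, apply_ite String.toList, coreOf, h1]
    by_cases hh : PySem.Chars.find cadena.toList ['#'] = -1
    · rw [if_pos hh, if_pos hh]
    · rw [if_neg hh, if_neg hh, PySem.Str.toList_slice, PySem.Chars.slice_eq_listSlice,
        PySem.List.slice_to _
          (by have := PySem.Chars.neg_one_le_find cadena.toList ['#']; omega)]
  set L := PySem.Chars.lower (coreOf cadena.toList) with hL
  have h2 : PySem.Str.find cs "e" = PySem.Chars.find L ['e'] := by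
    rw [PySem.Str.find_eq, hcore, show ("e" : String).toList = ['e'] from by decide]
  rw [h2]
  set j := PySem.Chars.find L ['e'] with hj0
  have hjge : -1 ≤ j := by rw [hj0]; exact PySem.Chars.neg_one_le_find L ['e']
  have hmant : (if j = -1 then cs else PySem.Str.slice cs none (some j)).toList
      = (if j = -1 then L else L.take j.toNat) := by
    by_cases hj : j = -1
    · rw [if_pos hj, if_pos hj, hcore]
    · rw [if_neg hj, if_neg hj, PySem.Str.toList_slice, hcore,
        PySem.Chars.slice_eq_listSlice, PySem.List.slice_to _ (by omega)]
  set mantL := (if j = -1 then L else L.take j.toNat) with hmL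
  set ms := (if j = -1 then cs else PySem.Str.slice cs none (some j)) with hms
  have h3 : PySem.Str.find ms "." = PySem.Chars.find mantL ['.'] := by
    rw [PySem.Str.find_eq, hmant, show ("." : String).toList = ['.'] from by decide]
  rw [h3]
  have hkge : -1 ≤ PySem.Chars.find mantL ['.'] := PySem.Chars.neg_one_le_find mantL ['.']
  have hok : (if PySem.Chars.find mantL ['.'] = -1 then PySem.Str.strIsdigit ms
      else PySem.Str.strIsdigit (PySem.Str.slice ms none (some (PySem.Chars.find mantL ['.']))) &&
           PySem.Str.strIsdigit (PySem.Str.slice ms (some (PySem.Chars.find mantL ['.'] + 1)) none))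
      = BLok mantL := by
    rw [BLok]
    by_cases hk : PySem.Chars.find mantL ['.'] = -1
    · rw [if_pos hk, if_pos hk, PySem.Str.strIsdigit_eq, hmant]; rfl
    · rw [if_neg hk, if_neg hk, PySem.Str.strIsdigit_eq, PySem.Str.strIsdigit_eq,
        PySem.Str.toList_slice, PySem.Str.toList_slice, hmant,
        PySem.Chars.slice_eq_listSlice, PySem.Chars.slice_eq_listSlice,
        PySem.List.slice_to _ (by omega), PySem.List.slice_from _ (by omega)]
      rfl
  rw [hok]
  by_cases hj : j = -1
  · have hmleq : mantL = L := by rw [hmL, if_pos hj]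
    rw [if_neg (fun hand : BLok mantL = true ∧ j ≠ -1 => hand.2 hj), hmleq, BL, if_pos (show PySem.Chars.find L ['e'] = -1 from by rw [← hj0]; exact hj)]
  · have hmleq : mantL = L.take j.toNat := by rw [hmL, if_neg hj]
    rw [hmleq, BL, if_neg (show ¬ PySem.Chars.find L ['e'] = -1 from by rw [← hj0]; exact hj), ← hj0]
    by_cases hOK : BLok (L.take j.toNat) = true
    · rw [if_pos (show BLok (L.take j.toNat) = true ∧ j ≠ -1 from ⟨hOK, hj⟩), if_pos hOK]
      have hexpoL : (PySem.Str.slice cs (some (j + 1)) none).toList = L.drop (j + 1).toNat := by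
        rw [PySem.Str.toList_slice, hcore, PySem.Chars.slice_eq_listSlice,
          PySem.List.slice_from _ (by omega)]
      set es := PySem.Str.slice cs (some (j + 1)) none with hes
      set eL := L.drop (j + 1).toNat with heL
      have he1 : ∀ d : Char, ∀ dS : String, dS.toList = [d] →
          ((PySem.Str.slice es none (some 1) = dS) ↔ (eL.take 1 = [d])) := by
        intro d dS hdS
        rw [strEq, PySem.Str.toList_slice, hexpoL, PySem.Chars.slice_eq_listSlice,
          PySem.List.slice_to _ (by omega), hdS,
          show ((1 : Int)).toNat = 1 from rfl]
      have he1p := he1 '+' "+" (by decide)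
      have he1m := he1 '-' "-" (by decide)
      rw [BLexp]
      by_cases hsgn : eL.take 1 = ['+'] ∨ eL.take 1 = ['-']
      · rw [if_pos (hsgn.elim (fun x => Or.inl (he1p.mpr x)) (fun x => Or.inr (he1m.mpr x))),
          if_pos hsgn, PySem.Str.strIsdigit_eq, PySem.Str.toList_slice, hexpoL,
          PySem.Chars.slice_eq_listSlice, PySem.List.slice_from _ (by omega),
          show ((1 : Int)).toNat = 1 from rfl]
        rfl
      · rw [if_neg (fun x : PySem.Str.slice es none (some 1) = "+" ∨ PySem.Str.slice es none (some 1) = "-" =>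
            hsgn (x.elim (fun y => Or.inl (he1p.mp y)) (fun y => Or.inr (he1m.mp y)))),
          if_neg hsgn, PySem.Str.strIsdigit_eq, hexpoL]
        rfl
    · rw [if_neg (fun hand : BLok (L.take j.toNat) = true ∧ j ≠ -1 => hOK hand.1), if_neg hOK,
        if_neg hOK, if_neg Bool.false_ne_true]

-- ===== VERDICT (by name: the statement is the Claim_ definition above) =====
theorem verificarNum_spec : Claim_equal_verificarNum := by
  intro cadena _
  unfold Spec_verificarNum
  rw [Abridge, Bbridge, listMain]
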